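-- pv_equiv track=rewrite | github.com/patrik-bartak/image-processing-43 | pattern_error_correction.py | simple_sequential_correction
-- ===== SOURCE A (Python) =====
-- from collections import Counter
--
-- def simple_sequential_correction(plate_strings):
--     if len(plate_strings) == 0:
--         return None
--
--     min_diff = 3  # minimum hamming distance between plates considered different
--
--     index_list = [0]
--     for i in range(len(plate_strings) - 1):
--         diff = hamming_distance(plate_strings[i], plate_strings[i + 1])
--         if diff is None:
--             continue
--         if diff >= min_diff:
--             # plate_strings[i] += " - NEW PLATE NEXT"
--             index_list.append(i + 1)
--     index_list.append(len(plate_strings))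
--
--     most_common = []
--     for i in range(len(index_list) - 1):
--         # https://www.geeksforgeeks.org/python-find-most-frequent-element-in-a-list/
--         # append the most common item out of the substrings defined by the index_list
--         most_common.append(Counter(plate_strings[index_list[i]: index_list[i + 1]]).most_common(1)[0][0])
--
--     return most_common
--
-- def hamming_distance(str1, str2):
--     dist = 0
--     if len(str1) != len(str2):
--         return None
--     for i in range(len(str1)):
--         if str1[i] != str2[i]:
--             dist += 1
--     return dist
-- ===== SOURCE B (Python) =====
-- def simple_sequential_correction(plate_strings):
--     if len(plate_strings) == 0:
--         return None
--     result = []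
--     first = plate_strings[0]
--     counts = {first: (1, 0)}   # plate -> (occurrences in current segment, index of first occurrence)
--     best = first
--     pos = 1
--     prev = first
--     for cur in plate_strings[1:]:
--         if len(prev) == len(cur) and sum(1 for a, b in zip(prev, cur) if a != b) >= 3:
--             # segment break: flush the running mode, restart the incremental state
--             result.append(best)
--             counts = {cur: (1, 0)}
--             best = cur
--             pos = 1
--         else:
--             c, f = counts.get(cur, (0, pos))
--             counts[cur] = (c + 1, f)
--             cb, fb = counts[best]
--             if (c + 1, -f) > (cb, -fb):
--                 best = cur
--             pos += 1
--         prev = cur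
--     result.append(best)
--     return result
-- ===== Notes on version B (the rewrite author's own statement) =====
-- stated objective: alternative
-- what changed: A materialises a boundary index_list, then slices the input and re-counts each segment with Counter(...).most_common(1); B never stores segments or boundaries: one pass maintains, per plate, a dict plate -> (count, first-occurrence index) and a running argmax (ties broken by earliest first occurrence), flushing the running best at each break, so each segment is never rescanned.
import Mathlib
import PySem

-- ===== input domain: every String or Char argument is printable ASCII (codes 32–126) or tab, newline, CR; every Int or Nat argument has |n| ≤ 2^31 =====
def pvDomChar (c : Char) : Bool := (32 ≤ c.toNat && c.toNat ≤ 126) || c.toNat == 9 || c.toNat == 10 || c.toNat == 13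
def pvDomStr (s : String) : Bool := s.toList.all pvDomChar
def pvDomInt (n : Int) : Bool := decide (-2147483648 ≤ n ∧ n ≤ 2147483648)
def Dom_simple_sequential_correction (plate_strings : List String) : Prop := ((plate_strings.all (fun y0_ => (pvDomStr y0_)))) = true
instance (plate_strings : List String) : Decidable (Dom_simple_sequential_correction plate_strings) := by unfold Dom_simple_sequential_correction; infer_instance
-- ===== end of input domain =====

-- B drops A's boundary index_list and per-segment Counter re-counting for a single pass that
-- maintains each plate's (count, first-occurrence index) and a running argmax per segment
-- (objective: alternative — segments are never materialised or rescanned).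

-- ===== PORT A =====

def hamming_distance (str1 str2 : String) : Option Int :=
  if PySem.Str.len str1 ≠ PySem.Str.len str2 then none
  else
    some ((PySem.List.pyRange 0 (PySem.Str.len str1)).foldl
      (fun dist i =>
        if PySem.List.pyGetD str1.toList i ' ' ≠ PySem.List.pyGetD str2.toList i ' ' then dist + 1
        else dist) 0)

-- Counter(xs).most_common(1)[0][0]: heapq.nlargest(1) over the counter's items is the first item
-- with maximal count (nlargest is stable); the "" default is never reached (segments are nonempty).
def mostCommon1 (xs : List String) : String :=
  match (PySem.Dict.counter xs).items with
  | [] => ""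
  | p :: rest => (rest.foldl (fun best q => if q.2 > best.2 then q else best) p).1

def simple_sequential_correction (plate_strings : List String) : Option (List String) :=
  if plate_strings.length = 0 then none
  else
    let min_diff : Int := 3
    let index_list : List Int :=
      ((PySem.List.pyRange 0 ((plate_strings.length : Int) - 1)).foldl
        (fun il i =>
          match hamming_distance (PySem.List.pyGetD plate_strings i "")
                                 (PySem.List.pyGetD plate_strings (i + 1) "") with
          | none => il
          | some diff => if diff ≥ min_diff then il ++ [i + 1] else il)
        [0]) ++ [(plate_strings.length : Int)]
    some ((PySem.List.pyRange 0 ((index_list.length : Int) - 1)).foldl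
      (fun mc i =>
        mc ++ [mostCommon1 (PySem.List.slice plate_strings
          (some (PySem.List.pyGetD index_list i 0))
          (some (PySem.List.pyGetD index_list (i + 1) 0)))])
      [])

-- ===== PORT B =====

-- len(prev) == len(cur) and sum(1 for a, b in zip(prev, cur) if a != b) >= 3
def breaksAt (prev cur : String) : Bool :=
  PySem.Str.len prev == PySem.Str.len cur
    && decide (3 ≤ (prev.toList.zip cur.toList).countP (fun ab => ab.1 != ab.2))

structure BSt where
  result : List String
  counts : PySem.Dict String (Int × Int)
  best : String
  pos : Int
  prev : String
deriving Repr, DecidableEq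

-- loop body of B; counts[best] is ported as getD with a never-used default: best is always a key
-- of counts (Python's counts[best] never raises here)
def bStep (st : BSt) (cur : String) : BSt :=
  if breaksAt st.prev cur then
    { result := st.result ++ [st.best], counts := PySem.Dict.empty.insert cur (1, 0),
      best := cur, pos := 1, prev := cur }
  else
    let cf := st.counts.getD cur (0, st.pos)
    let d' := st.counts.insert cur (cf.1 + 1, cf.2)
    let cb := d'.getD st.best (0, 0)
    { result := st.result, counts := d',
      best := if cf.1 + 1 > cb.1 ∨ (cf.1 + 1 = cb.1 ∧ -cf.2 > -cb.2) then cur else st.best,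
      pos := st.pos + 1, prev := cur }

def simple_sequential_correction_alt (plate_strings : List String) : Option (List String) :=
  match plate_strings with
  | [] => none
  | p0 :: rest =>
    let st := rest.foldl bStep
      { result := [], counts := PySem.Dict.empty.insert p0 (1, 0), best := p0, pos := 1, prev := p0 }
    some (st.result ++ [st.best])

-- ===== PRECONDITION & SPEC =====
def Spec_simple_sequential_correction (plate_strings : List String) (out : Option (List String)) : Prop := out = simple_sequential_correction_alt plate_strings
instance (plate_strings : List String) (out : Option (List String)) : Decidable (Spec_simple_sequential_correction plate_strings out) := by unfold Spec_simple_sequential_correction; infer_instance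

-- ===== CLAIM (what is proved, stated in full; the proofs are below) =====
def Claim_equal_simple_sequential_correction : Prop := ∀ (plate_strings : List String), Dom_simple_sequential_correction plate_strings → Spec_simple_sequential_correction plate_strings (simple_sequential_correction plate_strings)

-- ===== LEMMAS AND PROOFS =====

-- boundary positions of the segmentation, counted from offset k
def posns (prev : String) : List String → Nat → List Nat
  | [], _ => []
  | y :: ys, k => if breaksAt prev y then k :: posns y ys (k + 1) else posns y ys (k + 1)

-- the segments themselves, built left to right
def go (prev : String) (cur : List String) : List String → List (List String)
  | [] => [cur]
  | y :: ys => if breaksAt prev y then cur :: go y [y] ys else go y (cur ++ [y]) ys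

-- pure within-segment step of B's loop (the else branch of bStep on the segment state)
def segStep (s : PySem.Dict String (Int × Int) × String × Int) (cur : String) :
    PySem.Dict String (Int × Int) × String × Int :=
  let cf := s.1.getD cur (0, s.2.2)
  let d' := s.1.insert cur (cf.1 + 1, cf.2)
  let cb := d'.getD s.2.1 (0, 0)
  (d', if cf.1 + 1 > cb.1 ∨ (cf.1 + 1 = cb.1 ∧ -cf.2 > -cb.2) then cur else s.2.1, s.2.2 + 1)

def segSt (h : String) (t : List String) : PySem.Dict String (Int × Int) × String × Int :=
  t.foldl segStep (PySem.Dict.empty.insert h (1, 0), h, 1)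

def segBest (seg : List String) : String :=
  match seg with
  | [] => ""
  | h :: t => (segSt h t).2.1

-- invariant of the segment state after processing seg
def SegInv (seg : List String) (s : PySem.Dict String (Int × Int) × String × Int) : Prop :=
  s.2.2 = (seg.length : Int)
  ∧ (∀ x, s.1.get? x = if x ∈ seg then some ((seg.count x : Int), (seg.idxOf x : Int)) else none)
  ∧ s.2.1 ∈ seg
  ∧ (∀ j ∈ seg, j ≠ s.2.1 →
      seg.count s.2.1 > seg.count j
        ∨ (seg.count s.2.1 = seg.count j ∧ seg.idxOf s.2.1 < seg.idxOf j))

lemma idxOf_inj' (l : List String) (a b : String) (ha : a ∈ l) (hb : b ∈ l)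
    (h : l.idxOf a = l.idxOf b) : a = b := by
  have h1 := List.idxOf_lt_length_of_mem ha
  have h2 := List.idxOf_lt_length_of_mem hb
  have e1 : l[l.idxOf a]'h1 = a := List.getElem_idxOf h1
  have e2 : l[l.idxOf b]'h2 = b := List.getElem_idxOf h2
  calc a = l[l.idxOf a]'h1 := e1.symm
    _ = l[l.idxOf b]'h2 := by congr 1
    _ = b := e2

lemma inv_init (h : String) : SegInv [h] (PySem.Dict.empty.insert h (1, 0), h, 1) := by
  refine ⟨by simp, ?_, by simp, ?_⟩
  · intro x
    by_cases hx : x = h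
    · subst hx
      simp [PySem.Dict.get?_insert_self, List.idxOf_cons_self]
    · simp [PySem.Dict.get?_insert, hx, PySem.Dict.get?_empty]
  · intro j hj hne
    simp only [List.mem_singleton] at hj
    exact absurd hj hne

lemma inv_step (seg : List String) (s : PySem.Dict String (Int × Int) × String × Int)
    (hInv : SegInv seg s) (x : String) : SegInv (seg ++ [x]) (segStep s x) := by
  obtain ⟨d, best, pos⟩ := s
  obtain ⟨hpos, hget, hbmem, hbmax⟩ := hInv
  simp only at hpos hget hbmem hbmax
  have hxidx : (seg ++ [x]).idxOf x = if x ∈ seg then seg.idxOf x else seg.length := by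
    by_cases hx : x ∈ seg
    · rw [if_pos hx, List.idxOf_append_of_mem hx]
    · rw [if_neg hx]
      simp [List.idxOf_append, hx, List.idxOf_cons_self]
  have hcf : d.getD x (0, pos) = ((seg.count x : Int), ((seg ++ [x]).idxOf x : Int)) := by
    rw [PySem.Dict.getD_eq_get?_getD, hget x]
    by_cases hx : x ∈ seg
    · simp [hx, hxidx]
    · have hc0 : seg.count x = 0 := List.count_eq_zero.mpr hx
      simp [hx, hxidx, hc0, hpos]
  have hcnt : ∀ j, (seg ++ [x]).count j = seg.count j + (if j = x then 1 else 0) := by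
    intro j
    by_cases hj : j = x
    · simp [List.count_append, hj]
    · simp [List.count_append, hj, List.count_eq_zero]
  have hidxm : ∀ j ∈ seg, (seg ++ [x]).idxOf j = seg.idxOf j :=
    fun j hj => List.idxOf_append_of_mem hj
  have hget' : ∀ j, (d.insert x ((d.getD x (0, pos)).1 + 1, (d.getD x (0, pos)).2)).get? j
      = if j ∈ seg ++ [x] then some (((seg ++ [x]).count j : Int), ((seg ++ [x]).idxOf j : Int))
        else none := by
    intro j
    rw [PySem.Dict.get?_insert]
    by_cases hj : j = x
    · subst hj
      rw [if_pos rfl, if_pos (by simp)]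
      rw [hcf]
      have : (seg ++ [j]).count j = seg.count j + 1 := by rw [hcnt j]; simp
      rw [this]
      push_cast
      rfl
    · rw [if_neg hj, hget j]
      have hmem : j ∈ seg ++ [x] ↔ j ∈ seg := by simp [hj]
      by_cases hjs : j ∈ seg
      · rw [if_pos hjs, if_pos (hmem.mpr hjs), hcnt j, hidxm j hjs]
        simp [hj]
      · rw [if_neg hjs, if_neg (fun hc => hjs (hmem.mp hc))]
  have hbmem' : best ∈ seg ++ [x] := List.mem_append_left _ hbmem
  have hcb : (d.insert x ((d.getD x (0, pos)).1 + 1, (d.getD x (0, pos)).2)).getD best (0, 0)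
      = (((seg ++ [x]).count best : Int), ((seg ++ [x]).idxOf best : Int)) := by
    rw [PySem.Dict.getD_eq_get?_getD, hget' best, if_pos hbmem']
    rfl
  -- the Int comparison in segStep, read over Nat
  have hcondN : ((d.getD x (0, pos)).1 + 1
        > ((d.insert x ((d.getD x (0, pos)).1 + 1, (d.getD x (0, pos)).2)).getD best (0, 0)).1
      ∨ ((d.getD x (0, pos)).1 + 1
          = ((d.insert x ((d.getD x (0, pos)).1 + 1, (d.getD x (0, pos)).2)).getD best (0, 0)).1
        ∧ -(d.getD x (0, pos)).2
          > -((d.insert x ((d.getD x (0, pos)).1 + 1, (d.getD x (0, pos)).2)).getD best (0, 0)).2))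
      ↔ ((seg ++ [x]).count x > (seg ++ [x]).count best
        ∨ ((seg ++ [x]).count x = (seg ++ [x]).count best
          ∧ (seg ++ [x]).idxOf x < (seg ++ [x]).idxOf best)) := by
    rw [hcb, hcf]
    have hcx : (seg ++ [x]).count x = seg.count x + 1 := by rw [hcnt x]; simp
    rw [hcx]
    push_cast
    constructor
    · rintro (h1 | ⟨h1, h2⟩)
      · left; omega
      · right; constructor; omega; omega
    · rintro (h1 | ⟨h1, h2⟩)
      · left; omega
      · right; constructor; omega; omega
  simp only [segStep, SegInv]
  refine ⟨?_, ?_, ?_, ?_⟩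
  · show pos + 1 = ((seg ++ [x]).length : Int)
    rw [hpos]; push_cast [List.length_append, List.length_cons, List.length_nil]; omega
  · exact hget'
  · show (if _ then x else best) ∈ seg ++ [x]
    split
    · exact List.mem_append_right _ (List.mem_singleton.mpr rfl)
    · exact hbmem'
  · intro j hj
    split
    case isTrue hC =>
      intro hne
      have hCN := hcondN.mp hC
      rcases List.mem_append.mp hj with hjs | hjx
      · by_cases hjb : j = best
        · subst hjb; exact hCN
        · have hjx' : j ≠ x := hne
          have hbj := hbmax j hjs hjb
          have hcjj : (seg ++ [x]).count j = seg.count j := by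
            rw [hcnt j]; simp [hjx']
          have hijj := hidxm j hjs
          by_cases hbx : best = x
          · exfalso; rw [hbx] at hCN; omega
          · have hcb' : (seg ++ [x]).count best = seg.count best := by
              rw [hcnt best]; simp [hbx]
            have hib' := hidxm best hbmem
            omega
      · exact absurd (List.mem_singleton.mp hjx) hne
    case isFalse hC =>
      intro hne
      have hCN : ¬ ((seg ++ [x]).count x > (seg ++ [x]).count best
          ∨ ((seg ++ [x]).count x = (seg ++ [x]).count best
            ∧ (seg ++ [x]).idxOf x < (seg ++ [x]).idxOf best)) :=
        fun hcc => hC (hcondN.mpr hcc)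
      have hjmem : j ∈ seg ++ [x] := hj
      by_cases hjx' : j = x
      · rw [hjx']
        have hbx : best ≠ x := fun e => hne (by rw [hjx', ← e])
        have hinj : (seg ++ [x]).idxOf best ≠ (seg ++ [x]).idxOf x :=
          fun e => hbx (idxOf_inj' _ _ _ hbmem'
            (List.mem_append_right _ (List.mem_singleton.mpr rfl)) e)
        omega
      · have hjs : j ∈ seg := by
          rcases List.mem_append.mp hj with hjs | hjx
          · exact hjs
          · exact absurd (List.mem_singleton.mp hjx) hjx'
        have hbj := hbmax j hjs hne
        have hcjj : (seg ++ [x]).count j = seg.count j := by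
          rw [hcnt j]; simp [hjx']
        have hijj := hidxm j hjs
        by_cases hbx : best = x
        · have hcb2 : (seg ++ [x]).count best = seg.count best + 1 := by
            rw [hcnt best]; simp [hbx]
          omega
        · have hcb' : (seg ++ [x]).count best = seg.count best := by
            rw [hcnt best]; simp [hbx]
          have hib' := hidxm best hbmem
          omega

lemma inv_segSt (h : String) (t : List String) : SegInv (h :: t) (segSt h t) := by
  induction t using List.reverseRecOn with
  | nil => exact inv_init h
  | append_singleton t x ih =>
    have hfold : segSt h (t ++ [x]) = segStep (segSt h t) x := by
      unfold segSt
      rw [List.foldl_append]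
      rfl
    rw [hfold, show h :: (t ++ [x]) = (h :: t) ++ [x] from rfl]
    exact inv_step (h :: t) (segSt h t) ih x

lemma count_mismatch (l1 : List Char) : ∀ (l2 : List Char), l1.length = l2.length →
    (List.range l1.length).countP
      (fun i => decide (l1.getD i ' ' ≠ l2.getD i ' '))
      = (l1.zip l2).countP (fun ab => ab.1 != ab.2) := by
  induction l1 with
  | nil => intro l2 h; simp
  | cons c cs ih =>
    intro l2 h
    cases l2 with
    | nil => simp at h
    | cons d ds =>
      simp only [List.length_cons, List.range_succ_eq_map, List.countP_cons, List.countP_map,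
        List.zip_cons_cons]
      have := ih ds (by simpa using h)
      simp only [List.getD_cons_succ, List.getD_cons_zero, Function.comp_def]
      rw [this]
      by_cases hcd : c = d <;> simp [hcd, bne, add_comm]

lemma hamming_eq (a b : String) (h : PySem.Str.len a = PySem.Str.len b) :
    hamming_distance a b = some ((a.toList.zip b.toList).countP (fun ab => ab.1 != ab.2)) := by
  have hlen : a.toList.length = b.toList.length := by
    have := h; rw [PySem.Str.len_eq, PySem.Str.len_eq] at this; exact_mod_cast this
  rw [hamming_distance, if_neg (by
    simp only [ne_eq, Decidable.not_not]
    exact h)]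
  congr 1
  rw [PySem.Str.len_eq, PySem.List.pyRange_zero_natCast]
  rw [List.foldl_map]
  have hcnt := PySem.List.foldl_count_if
    (fun i : Nat => decide (a.toList.getD i ' ' ≠ b.toList.getD i ' ')) (List.range a.toList.length) 0
  simp only [decide_eq_true_eq] at hcnt
  simp only [PySem.List.pyGetD_natCast]
  rw [hcnt, zero_add, count_mismatch a.toList b.toList hlen]

lemma step_eq (a b : String) (il : List Int) (x : Int) :
    (match hamming_distance a b with
     | none => il
     | some diff => if diff ≥ 3 then il ++ [x] else il)
      = if breaksAt a b then il ++ [x] else il := by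
  by_cases h : PySem.Str.len a = PySem.Str.len b
  · rw [hamming_eq a b h]
    simp only [breaksAt, h, BEq.rfl, Bool.true_and]
    by_cases h3 : 3 ≤ (a.toList.zip b.toList).countP (fun ab => ab.1 != ab.2)
    · have : ((a.toList.zip b.toList).countP (fun ab => ab.1 != ab.2) : Int) ≥ 3 := by exact_mod_cast h3
      simp [h3, this]
    · have : ¬ ((a.toList.zip b.toList).countP (fun ab => ab.1 != ab.2) : Int) ≥ 3 := by
        intro hc; exact h3 (by exact_mod_cast hc)
      simp [h3, this]
  · have hb : breaksAt a b = false := by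
      have hne : ¬ a.length = b.length := by
        intro hc
        have hc' : a.toList.length = b.toList.length := by
          rw [String.length_toList, String.length_toList]; exact hc
        exact h (by rw [PySem.Str.len_eq, PySem.Str.len_eq, hc'])
      simp [breaksAt, hne]
    have hd : hamming_distance a b = none := by rw [hamming_distance, if_pos h]
    rw [hd, hb]
    simp

-- the filtered index range of A's first loop is posns
lemma posns_shift (rest : List String) : ∀ (prev : String) (k j : Nat),
    posns prev rest (k + j) = (posns prev rest k).map (· + j) := by
  induction rest with
  | nil => intro prev k j; simp [posns]
  | cons y ys ih =>
    intro prev k j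
    have h1 : k + j + 1 = (k + 1) + j := by omega
    by_cases hb : breaksAt prev y <;> simp [posns, hb, h1, ih]

lemma range_filter_eq_posns (rest : List String) : ∀ (prev : String),
    ((List.range rest.length).filter
        (fun i => breaksAt ((prev :: rest).getD i "") ((prev :: rest).getD (i + 1) ""))).map (· + 1)
      = posns prev rest 1 := by
  induction rest with
  | nil => intro prev; simp [posns]
  | cons y ys ih =>
    intro prev
    have e1 : List.range (y :: ys).length = 0 :: (List.range ys.length).map (· + 1) := by
      simp [List.range_succ_eq_map]
    rw [e1, List.filter_cons, List.filter_map]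
    have e2 : ((fun i => breaksAt ((prev :: y :: ys).getD i "") ((prev :: y :: ys).getD (i + 1) "")) ∘ (· + 1))
        = (fun i => breaksAt ((y :: ys).getD i "") ((y :: ys).getD (i + 1) "")) := rfl
    rw [e2]
    by_cases hb : breaksAt prev y
    · have hb' : breaksAt ((prev :: y :: ys).getD 0 "") ((prev :: y :: ys).getD (0 + 1) "") = true := hb
      rw [if_pos hb', List.map_cons, List.map_map]
      have e3 : ((· + 1 : Nat → Nat) ∘ (· + 1)) = (fun i => (i + 1) + 1) := rfl
      have e4 : (List.filter (fun i => breaksAt ((y :: ys).getD i "") ((y :: ys).getD (i + 1) ""))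
          (List.range ys.length)).map (fun i => (i + 1) + 1)
          = ((List.filter (fun i => breaksAt ((y :: ys).getD i "") ((y :: ys).getD (i + 1) ""))
          (List.range ys.length)).map (· + 1)).map (· + 1) := by
        rw [List.map_map]; rfl
      rw [e3, e4, ih y]
      show (1 : Nat) :: _ = posns prev (y :: ys) 1
      rw [← posns_shift ys y 1 1]
      simp [posns, hb]
    · have hb' : ¬ breaksAt ((prev :: y :: ys).getD 0 "") ((prev :: y :: ys).getD (0 + 1) "") = true := hb
      rw [if_neg hb', List.map_map]
      have e3 : ((· + 1 : Nat → Nat) ∘ (· + 1)) = (fun i => (i + 1) + 1) := rfl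
      have e4 : (List.filter (fun i => breaksAt ((y :: ys).getD i "") ((y :: ys).getD (i + 1) ""))
          (List.range ys.length)).map (fun i => (i + 1) + 1)
          = ((List.filter (fun i => breaksAt ((y :: ys).getD i "") ((y :: ys).getD (i + 1) ""))
          (List.range ys.length)).map (· + 1)).map (· + 1) := by
        rw [List.map_map]; rfl
      rw [e3, e4, ih y]
      rw [← posns_shift ys y 1 1]
      simp [posns, hb]

-- A's second loop indexes consecutive pairs
lemma map_range_pairs {β : Type} (g : Nat → Nat → β) : ∀ (L : List Nat),
    (List.range (L.length - 1)).map (fun i => g (L.getD i 0) (L.getD (i + 1) 0))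
      = (L.zip L.tail).map (fun pr => g pr.1 pr.2) := by
  intro L
  match L with
  | [] => simp
  | [a] => simp
  | a :: b :: t =>
    have ih := map_range_pairs g (b :: t)
    have e1 : List.range ((a :: b :: t).length - 1) = 0 :: (List.range ((b :: t).length - 1)).map (· + 1) := by
      simp [List.range_succ_eq_map]
    rw [e1, List.map_cons, List.map_map]
    have e2 : ((fun i => g ((a :: b :: t).getD i 0) ((a :: b :: t).getD (i + 1) 0)) ∘ (· + 1))
        = (fun i => g ((b :: t).getD i 0) ((b :: t).getD (i + 1) 0)) := rfl
    rw [e2, ih]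
    rfl

-- slices between consecutive boundaries are exactly the streamed segments
lemma slices_eq_go : ∀ (rest : List String) (prev : String) (cur : List String),
    (((0 :: (posns prev rest cur.length ++ [cur.length + rest.length])).zip
        (posns prev rest cur.length ++ [cur.length + rest.length])).map
      (fun pr : Nat × Nat => ((cur ++ rest).drop pr.1).take (pr.2 - pr.1)))
      = go prev cur rest := by
  intro rest
  induction rest with
  | nil =>
    intro prev cur
    simp [posns, go]
  | cons y ys ih =>
    intro prev cur
    by_cases hb : breaksAt prev y
    · simp only [posns, go, hb, if_true, List.length_cons]
      rw [List.cons_append, List.zip_cons_cons, List.map_cons]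
      have hhead : ((cur ++ y :: ys).drop 0).take (cur.length - 0)
          = cur := by
        simp [List.take_left (l₁ := cur) (l₂ := y :: ys)]
      rw [hhead]
      refine congrArg _ ?_
      have hshift : posns y ys (cur.length + 1) = (posns y ys 1).map (· + cur.length) := by
        have := posns_shift ys y 1 cur.length
        rw [show (1 : Nat) + cur.length = cur.length + 1 by omega] at this
        exact this
      have hlist : (cur.length :: (posns y ys (cur.length + 1) ++ [cur.length + (ys.length + 1)]))
          = ((0 :: (posns y ys 1 ++ [1 + ys.length])).map (· + cur.length)) := by
        rw [hshift]
        simp [List.map_append]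
        omega
      have htail : (posns y ys (cur.length + 1) ++ [cur.length + (ys.length + 1)])
          = ((posns y ys 1 ++ [1 + ys.length]).map (· + cur.length)) := by
        rw [hshift]
        simp [List.map_append]
        omega
      rw [hlist, htail, List.zip_map, List.map_map]
      have hpt : ((fun pr : Nat × Nat => ((cur ++ y :: ys).drop pr.1).take (pr.2 - pr.1)) ∘
            Prod.map (· + cur.length) (· + cur.length))
          = (fun pr : Nat × Nat => ((y :: ys).drop pr.1).take (pr.2 - pr.1)) := by
        funext pr
        show (((cur ++ y :: ys).drop (pr.1 + cur.length)).take ((pr.2 + cur.length) - (pr.1 + cur.length))) = _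
        rw [show pr.1 + cur.length = cur.length + pr.1 by omega,
          List.drop_length_add_append pr.1]
        congr 1
        omega
      rw [hpt]
      have := ih y [y]
      simpa using this
    · simp only [posns, go, hb, Bool.false_eq_true, if_false, List.length_cons]
      have := ih y (cur ++ [y])
      rw [List.length_append] at this
      simp only [List.length_cons, List.length_nil, List.append_assoc, List.cons_append,
        List.nil_append] at this ⊢
      rw [show cur.length + 1 + ys.length = cur.length + (ys.length + 1) by omega] at this
      exact this

-- B's fold accumulates: current segment state + flushed bests = go's segments mapped through segBest
lemma b_fold_eq : ∀ (rest : List String) (res : List String) (h : String) (t : List String) (prev : String),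
    (let st := rest.foldl bStep
        { result := res, counts := (segSt h t).1, best := (segSt h t).2.1,
          pos := (segSt h t).2.2, prev := prev };
      st.result ++ [st.best]) = res ++ (go prev (h :: t) rest).map segBest := by
  intro rest
  induction rest with
  | nil =>
    intro res h t prev
    simp [go, segBest]
  | cons y ys ih =>
    intro res h t prev
    rw [List.foldl_cons]
    by_cases hb : breaksAt prev y
    · have hstep : bStep ⟨res, (segSt h t).1, (segSt h t).2.1, (segSt h t).2.2, prev⟩ y
          = ⟨res ++ [(segSt h t).2.1], (segSt y []).1, (segSt y []).2.1, (segSt y []).2.2, y⟩ := by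
        simp [bStep, hb]; exact ⟨rfl, rfl, rfl⟩
      rw [hstep]
      have := ih (res ++ [(segSt h t).2.1]) y [] y
      simp only at this
      rw [this]
      simp [go, hb, segBest]
    · have hstep : bStep ⟨res, (segSt h t).1, (segSt h t).2.1, (segSt h t).2.2, prev⟩ y
          = ⟨res, (segSt h (t ++ [y])).1, (segSt h (t ++ [y])).2.1, (segSt h (t ++ [y])).2.2, y⟩ := by
        have hfold : segSt h (t ++ [y]) = segStep (segSt h t) y := by
          unfold segSt
          rw [List.foldl_append]
          rfl
        rw [hfold]
        simp [bStep, hb, segStep]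
      rw [hstep]
      have := ih res h (t ++ [y]) y
      simp only at this
      rw [this]
      simp only [go, hb, Bool.false_eq_true, if_false]
      rfl

-- generic scan-argmax: first element attaining the running maximum
lemma foldl_max_attained {κ : Type} [LinearOrder κ] :
    ∀ (l : List κ) (a : κ), l.foldl max a = a ∨ l.foldl max a ∈ l := by
  intro l
  induction l with
  | nil => intro a; left; rfl
  | cons y t ih =>
    intro a
    rw [List.foldl_cons]
    rcases ih (max a y) with hc | hc
    · rcases max_choice a y with hm | hm
      · left; rw [hc, hm]
      · right; rw [hc, hm]; exact List.mem_cons_self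
    · right; exact List.mem_cons_of_mem _ hc

lemma foldl_argmax_eq {α κ : Type} [LinearOrder κ] (f : α → κ) :
    ∀ (l : List α) (b : α),
      l.foldl (fun best x => if f x > f best then x else best) b
        = ((b :: l).find? (fun x => decide (f x = (l.map f).foldl max (f b)))).getD b := by
  intro l
  induction l with
  | nil => intro b; simp
  | cons x t ih =>
    intro b
    rw [List.foldl_cons, List.map_cons, List.foldl_cons]
    by_cases h : f b < f x
    · rw [if_pos h]
      rw [max_eq_right (le_of_lt h)]
      rw [ih x]
      have hxM : f x ≤ (t.map f).foldl max (f x) := (PySem.List.le_foldl_max _ _).1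
      have hbnot : ¬ (f b = (t.map f).foldl max (f x)) := by
        intro hc; exact absurd (hc ▸ (lt_of_lt_of_le h hxM)) (lt_irrefl _)
      have hsome : ((x :: t).find? (fun y => decide (f y = (t.map f).foldl max (f x)))).isSome := by
        rw [List.find?_isSome]
        rcases foldl_max_attained (t.map f) (f x) with hc | hc
        · exact ⟨x, List.mem_cons_self, by simp [hc]⟩
        · rcases List.mem_map.mp hc with ⟨z, hz, hfz⟩
          exact ⟨z, List.mem_cons_of_mem _ hz, by simp [hfz]⟩
      rcases Option.isSome_iff_exists.mp hsome with ⟨w, hw⟩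
      have h1 : List.find? (fun y => decide (f y = (t.map f).foldl max (f x))) (b :: x :: t)
          = some w := by
        rw [List.find?_cons_of_neg (a := b) (by simpa using hbnot)]
        exact hw
      rw [hw, h1]
      rfl
    · rw [if_neg h]
      rw [max_eq_left (not_lt.mp h)]
      rw [ih b]
      have hbM : f b ≤ (t.map f).foldl max (f b) := (PySem.List.le_foldl_max _ _).1
      by_cases hb : f b = (t.map f).foldl max (f b)
      · rw [List.find?_cons_of_pos (by simpa using hb),
          List.find?_cons_of_pos (by simpa using hb)]
      · have hxnot : ¬ (f x = (t.map f).foldl max (f b)) := by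
          intro hc
          exact hb (le_antisymm hbM (hc ▸ not_lt.mp h))
        rw [List.find?_cons_of_neg (by simpa using hb),
          List.find?_cons_of_neg (by simpa using hb),
          List.find?_cons_of_neg (by simpa using hxnot)]

-- find? over a PySem set sees the same first hit as over the underlying list
lemma find?_foldl_add {α : Type} [BEq α] [LawfulBEq α] (p : α → Bool) :
    ∀ (t s : List α), List.find? p (t.foldl PySem.Set.add s) = (List.find? p s).orElse (fun _ => List.find? p t) := by
  intro t
  induction t with
  | nil => intro s; cases hfs : List.find? p s <;> simp [hfs]
  | cons y ys ih =>
    intro s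
    rw [List.foldl_cons, ih]
    by_cases hc : s.contains y
    · have hmem : y ∈ s := List.mem_of_elem_eq_true hc
      rw [show PySem.Set.add s y = s from by simp [PySem.Set.add, hmem]]
      cases hfs : List.find? p s with
      | some z => simp
      | none =>
        have hpy : p y = false := by
          have := List.find?_eq_none.mp hfs y (List.mem_of_elem_eq_true hc)
          simpa using this
        simp [hpy]
    · have hmem : y ∉ s := fun h => hc (List.elem_eq_true_of_mem h)
      rw [show PySem.Set.add s y = s ++ [y] from by simp [PySem.Set.add, hmem]]
      rw [List.find?_append]
      cases hfs : List.find? p s <;> cases hpy : p y <;> simp [hpy]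

lemma find?_ofList {α : Type} [BEq α] [LawfulBEq α] (p : α → Bool) (xs : List α) :
    List.find? p (PySem.Set.ofList xs) = List.find? p xs := by
  have := find?_foldl_add p xs []
  simpa [PySem.Set.ofList, PySem.Set.empty] using this

lemma cast_foldl_max (l : List Nat) : ∀ (a : Nat),
    (l.map (fun n : Nat => (n : Int))).foldl max (a : Int) = ((l.foldl max a : Nat) : Int) := by
  induction l with
  | nil => intro a; rfl
  | cons y t ih =>
    intro a
    rw [List.map_cons, List.foldl_cons, List.foldl_cons, ← Nat.cast_max, ih]

-- Counter-based most_common(1) = first element of the list attaining the maximal count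
lemma mostCommon1_char (h : String) (t : List String) :
    mostCommon1 (h :: t)
      = (((h :: t).find? (fun x => decide ((h :: t).count x
          = ((h :: t).map (fun s => List.count s (h :: t))).foldl max (List.count h (h :: t))))).getD h) := by
  cases hd : PySem.Set.ofList (h :: t) with
  | nil =>
    exfalso
    have hm : h ∈ PySem.Set.ofList (h :: t) := (PySem.Set.mem_ofList _ _).mpr List.mem_cons_self
    rw [hd] at hm; simp at hm
  | cons d0 dt =>
    have hmemded : ∀ z, z ∈ d0 :: dt ↔ z ∈ h :: t := by
      intro z; rw [← hd]; exact PySem.Set.mem_ofList _ _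
    have hitems : (PySem.Dict.counter (h :: t)).items
        = (d0, (List.count d0 (h :: t) : Int))
          :: dt.map (fun k => (k, (List.count k (h :: t) : Int))) := by
      rw [PySem.Dict.items_counter, hd, List.map_cons]
    have hA : mostCommon1 (h :: t)
        = ((((d0, (List.count d0 (h :: t) : Int))
            :: dt.map (fun k => (k, (List.count k (h :: t) : Int)))).find?
              (fun q : String × Int => decide (q.2 = ((dt.map (fun k => (k, (List.count k (h :: t) : Int)))).map
                  (fun q : String × Int => q.2)).foldl max (List.count d0 (h :: t) : Int)))).getD
            (d0, (List.count d0 (h :: t) : Int))).1 := by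
      unfold mostCommon1
      rw [hitems]
      show ((dt.map (fun k => (k, (List.count k (h :: t) : Int)))).foldl
          (fun best q => if q.2 > best.2 then q else best)
          (d0, (List.count d0 (h :: t) : Int))).1 = _
      rw [foldl_argmax_eq (fun q : String × Int => q.2)]
    have hcast : ((dt.map (fun k => (k, (List.count k (h :: t) : Int)))).map
          (fun q : String × Int => q.2)).foldl max (List.count d0 (h :: t) : Int)
        = (((dt.map (fun s => List.count s (h :: t))).foldl max (List.count d0 (h :: t)) : Nat) : Int) := by
      rw [List.map_map]
      rw [show ((fun q : String × Int => q.2) ∘ fun k => (k, (List.count k (h :: t) : Int)))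
          = (fun n : Nat => (n : Int)) ∘ (fun s => List.count s (h :: t)) from rfl]
      rw [← List.map_map]
      exact cast_foldl_max _ _
    have hb1 := PySem.List.le_foldl_max ((h :: t).map (fun s => List.count s (h :: t))) (List.count h (h :: t))
    have hb2 := PySem.List.le_foldl_max (dt.map (fun s => List.count s (h :: t))) (List.count d0 (h :: t))
    have hle1 : (dt.map (fun s => List.count s (h :: t))).foldl max (List.count d0 (h :: t))
        ≤ ((h :: t).map (fun s => List.count s (h :: t))).foldl max (List.count h (h :: t)) := by
      rcases foldl_max_attained (dt.map (fun s => List.count s (h :: t))) (List.count d0 (h :: t)) with hc | hc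
      · rw [hc]
        exact hb1.2 _ (List.mem_map.mpr ⟨d0, (hmemded d0).mp List.mem_cons_self, rfl⟩)
      · rcases List.mem_map.mp hc with ⟨z, hz, hfz⟩
        rw [← hfz]
        exact hb1.2 _ (List.mem_map.mpr ⟨z, (hmemded z).mp (List.mem_cons_of_mem _ hz), rfl⟩)
    have hle2 : ((h :: t).map (fun s => List.count s (h :: t))).foldl max (List.count h (h :: t))
        ≤ (dt.map (fun s => List.count s (h :: t))).foldl max (List.count d0 (h :: t)) := by
      rcases foldl_max_attained ((h :: t).map (fun s => List.count s (h :: t))) (List.count h (h :: t)) with hc | hc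
      · rw [hc]
        rcases List.mem_cons.mp ((hmemded h).mpr List.mem_cons_self) with hh | hh
        · rw [congrArg (fun z => List.count z (h :: t)) hh]; exact hb2.1
        · exact hb2.2 _ (List.mem_map.mpr ⟨h, by simpa using hh, rfl⟩)
      · rcases List.mem_map.mp hc with ⟨z, hz, hfz⟩
        rw [← hfz]
        rcases List.mem_cons.mp ((hmemded z).mpr hz) with hh | hh
        · rw [congrArg (fun z => List.count z (h :: t)) hh]; exact hb2.1
        · exact hb2.2 _ (List.mem_map.mpr ⟨z, by simpa using hh, rfl⟩)
    have hN : (dt.map (fun s => List.count s (h :: t))).foldl max (List.count d0 (h :: t))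
        = ((h :: t).map (fun s => List.count s (h :: t))).foldl max (List.count h (h :: t)) :=
      le_antisymm hle1 hle2
    have hsome : ((h :: t).find? (fun x => decide (List.count x (h :: t)
        = ((h :: t).map (fun s => List.count s (h :: t))).foldl max (List.count h (h :: t))))).isSome := by
      rw [List.find?_isSome]
      rcases foldl_max_attained ((h :: t).map (fun s => List.count s (h :: t))) (List.count h (h :: t)) with hc | hc
      · exact ⟨h, List.mem_cons_self, by rw [hc]; simp⟩
      · rcases List.mem_map.mp hc with ⟨z, hz, hfz⟩
        exact ⟨z, hz, by rw [← hfz]; simp⟩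
    rcases Option.isSome_iff_exists.mp hsome with ⟨w, hw⟩
    have hAfind : ((d0, (List.count d0 (h :: t) : Int))
          :: dt.map (fun k => (k, (List.count k (h :: t) : Int)))).find?
            (fun q => decide (q.2 = ((dt.map (fun k => (k, (List.count k (h :: t) : Int)))).map
                (fun q : String × Int => q.2)).foldl max (List.count d0 (h :: t) : Int)))
        = some (w, (List.count w (h :: t) : Int)) := by
      rw [show ((d0, (List.count d0 (h :: t) : Int))
          :: dt.map (fun k => (k, (List.count k (h :: t) : Int))))
          = (d0 :: dt).map (fun k => (k, (List.count k (h :: t) : Int))) from rfl]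
      rw [List.find?_map]
      have hpred : ((fun q : String × Int => decide (q.2 = ((dt.map (fun k => (k, (List.count k (h :: t) : Int)))).map
            (fun q : String × Int => q.2)).foldl max (List.count d0 (h :: t) : Int)))
            ∘ (fun k => (k, (List.count k (h :: t) : Int))))
          = (fun x => decide (List.count x (h :: t)
            = ((h :: t).map (fun s => List.count s (h :: t))).foldl max (List.count h (h :: t)))) := by
        funext k
        simp only [Function.comp_apply, hcast, hN, Nat.cast_inj]
      rw [hpred, ← hd, find?_ofList, hw]
      rfl
    rw [hA, hAfind, hw]
    rfl

-- first element of the list attaining the max count = B's unique lex-argmax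
lemma find?_first_min_idx {α : Type} [DecidableEq α] (p : α → Bool) :
    ∀ (l : List α) (k : α), k ∈ l → p k = true →
      (∀ j ∈ l, p j = true → l.idxOf k ≤ l.idxOf j) →
      l.find? p = some k := by
  intro l
  induction l with
  | nil => intro k hk; simp at hk
  | cons a t ih =>
    intro k hk hpk hmin
    by_cases hpa : p a = true
    · rw [List.find?_cons_of_pos hpa]
      have h0 := hmin a List.mem_cons_self hpa
      rw [List.idxOf_cons_self] at h0
      have hka : k = a := by
        by_cases hka : k = a
        · exact hka
        · exfalso
          rw [List.idxOf_cons_ne t (Ne.symm hka)] at h0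
          omega
      rw [hka]
    · rw [List.find?_cons_of_neg hpa]
      have hka : k ≠ a := fun e => hpa (e ▸ hpk)
      have hkt : k ∈ t := by
        rcases List.mem_cons.mp hk with e | e
        · exact absurd e hka
        · exact e
      refine ih k hkt hpk ?_
      intro j hj hpj
      have hja : j ≠ a := fun e => hpa (e ▸ hpj)
      have hmj := hmin j (List.mem_cons_of_mem _ hj) hpj
      rw [List.idxOf_cons_ne t (Ne.symm hka), List.idxOf_cons_ne t (Ne.symm hja)] at hmj
      omega

lemma segBest_eq (h : String) (t : List String) : segBest (h :: t) = mostCommon1 (h :: t) := by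
  obtain ⟨-, -, hbmem, hbmax⟩ := inv_segSt h t
  rw [mostCommon1_char h t]
  have hub : ∀ j ∈ (h :: t), List.count j (h :: t) ≤ List.count (segSt h t).2.1 (h :: t) := by
    intro j hj
    by_cases hjk : j = (segSt h t).2.1
    · rw [hjk]
    · rcases hbmax j hj hjk with h1 | ⟨h1, _⟩ <;> omega
  have hkM : List.count (segSt h t).2.1 (h :: t)
      = ((h :: t).map (fun s => List.count s (h :: t))).foldl max (List.count h (h :: t)) := by
    refine le_antisymm ?_ ?_
    · exact (PySem.List.le_foldl_max _ _).2 _ (List.mem_map.mpr ⟨_, hbmem, rfl⟩)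
    · rcases foldl_max_attained ((h :: t).map (fun s => List.count s (h :: t)))
          (List.count h (h :: t)) with hc | hc
      · rw [hc]; exact hub h List.mem_cons_self
      · rcases List.mem_map.mp hc with ⟨z, hz, hfz⟩
        rw [← hfz]
        exact hub z hz
  have hfind : (h :: t).find? (fun x => decide (List.count x (h :: t)
      = ((h :: t).map (fun s => List.count s (h :: t))).foldl max (List.count h (h :: t))))
      = some (segSt h t).2.1 := by
    apply find?_first_min_idx _ _ _ hbmem (by simp [hkM])
    intro j hj hpj
    simp only [decide_eq_true_eq] at hpj
    by_cases hjk : j = (segSt h t).2.1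
    · rw [hjk]
    · rcases hbmax j hj hjk with h1 | ⟨h1, h2⟩
      · omega
      · exact le_of_lt h2
  rw [hfind]
  rfl

-- A's first loop produces the boundary list
lemma index_list_eq (p0 : String) (rest : List String) :
    ((PySem.List.pyRange 0 (((p0 :: rest).length : Int) - 1)).foldl
        (fun il i =>
          match hamming_distance (PySem.List.pyGetD (p0 :: rest) i "")
                                 (PySem.List.pyGetD (p0 :: rest) (i + 1) "") with
          | none => il
          | some diff => if diff ≥ (3 : Int) then il ++ [i + 1] else il)
        [0]) ++ [((p0 :: rest).length : Int)]
      = (0 :: (posns p0 rest 1 ++ [1 + rest.length])).map (fun n : Nat => (n : Int)) := by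
  have h1 : (fun (il : List Int) (i : Int) =>
      match hamming_distance (PySem.List.pyGetD (p0 :: rest) i "")
                             (PySem.List.pyGetD (p0 :: rest) (i + 1) "") with
      | none => il
      | some diff => if diff ≥ (3 : Int) then il ++ [i + 1] else il)
      = (fun il i => if breaksAt (PySem.List.pyGetD (p0 :: rest) i "")
            (PySem.List.pyGetD (p0 :: rest) (i + 1) "") then il ++ [i + 1] else il) := by
    funext il i
    exact step_eq _ _ il (i + 1)
  rw [h1]
  rw [PySem.List.foldl_append_if
    (fun i => breaksAt (PySem.List.pyGetD (p0 :: rest) i "") (PySem.List.pyGetD (p0 :: rest) (i + 1) ""))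
    (fun i => i + 1)]
  have h2 : (((p0 :: rest).length : Int)) - 1 = ((rest.length : Nat) : Int) := by
    simp
  rw [h2, PySem.List.pyRange_zero_natCast, List.filter_map]
  have h3 : ((fun i => breaksAt (PySem.List.pyGetD (p0 :: rest) i "")
        (PySem.List.pyGetD (p0 :: rest) (i + 1) "")) ∘ (fun k : Nat => (k : Int)))
      = (fun i => breaksAt ((p0 :: rest).getD i "") ((p0 :: rest).getD (i + 1) "")) := by
    funext i
    have hc : ((i : Int) + 1) = ((i + 1 : Nat) : Int) := by push_cast; ring
    show breaksAt (PySem.List.pyGetD (p0 :: rest) (i : Int) "")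
        (PySem.List.pyGetD (p0 :: rest) ((i : Int) + 1) "") = _
    rw [hc, PySem.List.pyGetD_natCast, PySem.List.pyGetD_natCast]
  rw [h3, List.map_map]
  have h4 : ((fun i : Int => i + 1) ∘ (fun k : Nat => (k : Int)))
      = (fun n : Nat => (n : Int)) ∘ (fun k : Nat => k + 1) := by
    funext k; simp
  rw [h4, ← List.map_map, range_filter_eq_posns rest p0]
  have h5 : ((p0 :: rest).length : Int) = ((1 + rest.length : Nat) : Int) := by
    simp; omega
  rw [h5]
  simp [List.map_append]

-- every segment go produces from a nonempty current segment is nonempty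
lemma go_ne_nil : ∀ (rest : List String) (prev : String) (cur : List String), cur ≠ [] →
    ∀ seg ∈ go prev cur rest, seg ≠ [] := by
  intro rest
  induction rest with
  | nil => intro prev cur hc seg hs; simp [go] at hs; exact hs ▸ hc
  | cons y ys ih =>
    intro prev cur hc seg hs
    by_cases hb : breaksAt prev y
    · simp only [go, hb, if_true, List.mem_cons] at hs
      rcases hs with hs | hs
      · exact hs ▸ hc
      · exact ih y [y] (by simp) seg hs
    · simp only [go, hb, Bool.false_eq_true, if_false] at hs
      exact ih y (cur ++ [y]) (by simp) seg hs

-- ===== VERDICT (by name: the statement is the Claim_ definition above) =====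
theorem simple_sequential_correction_spec : Claim_equal_simple_sequential_correction := by
  intro ps _
  unfold Spec_simple_sequential_correction
  cases ps with
  | nil => rfl
  | cons p0 rest =>
    have hB : simple_sequential_correction_alt (p0 :: rest)
        = some ((go p0 [p0] rest).map segBest) := by
      unfold simple_sequential_correction_alt
      have := b_fold_eq rest [] p0 [] p0
      simp only [List.nil_append] at this
      exact congrArg some this
    rw [hB]
    show (if (p0 :: rest).length = 0 then none else _) = _
    rw [if_neg (by simp)]
    show some ((PySem.List.pyRange 0
        ((((((PySem.List.pyRange 0 (((p0 :: rest).length : Int) - 1)).foldl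
          (fun il i =>
            match hamming_distance (PySem.List.pyGetD (p0 :: rest) i "")
                                   (PySem.List.pyGetD (p0 :: rest) (i + 1) "") with
            | none => il
            | some diff => if diff ≥ (3 : Int) then il ++ [i + 1] else il)
          [0]) ++ [((p0 :: rest).length : Int)]).length : Int)) - 1)).foldl
        (fun mc i =>
          mc ++ [mostCommon1 (PySem.List.slice (p0 :: rest)
            (some (PySem.List.pyGetD (((PySem.List.pyRange 0 (((p0 :: rest).length : Int) - 1)).foldl
              (fun il i =>
                match hamming_distance (PySem.List.pyGetD (p0 :: rest) i "")
                                       (PySem.List.pyGetD (p0 :: rest) (i + 1) "") with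
                | none => il
                | some diff => if diff ≥ (3 : Int) then il ++ [i + 1] else il)
              [0]) ++ [((p0 :: rest).length : Int)]) i 0))
            (some (PySem.List.pyGetD (((PySem.List.pyRange 0 (((p0 :: rest).length : Int) - 1)).foldl
              (fun il i =>
                match hamming_distance (PySem.List.pyGetD (p0 :: rest) i "")
                                       (PySem.List.pyGetD (p0 :: rest) (i + 1) "") with
                | none => il
                | some diff => if diff ≥ (3 : Int) then il ++ [i + 1] else il)
              [0]) ++ [((p0 :: rest).length : Int)]) (i + 1) 0)))])
        []) = some ((go p0 [p0] rest).map segBest)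
    rw [index_list_eq p0 rest]
    rw [PySem.List.foldl_append_singleton_eq_map]
    have hlen : ((((0 :: (posns p0 rest 1 ++ [1 + rest.length])).map (fun n : Nat => (n : Int))).length : Int)) - 1
        = (((0 :: (posns p0 rest 1 ++ [1 + rest.length])).length - 1 : Nat) : Int) := by
      rw [List.length_map]
      have : 1 ≤ (0 :: (posns p0 rest 1 ++ [1 + rest.length])).length := by simp
      omega
    rw [hlen, PySem.List.pyRange_zero_natCast, List.map_map, List.nil_append]
    have hfun : ((fun i : Int =>
        mostCommon1 (PySem.List.slice (p0 :: rest)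
          (some (PySem.List.pyGetD ((0 :: (posns p0 rest 1 ++ [1 + rest.length])).map (fun n : Nat => (n : Int))) i 0))
          (some (PySem.List.pyGetD ((0 :: (posns p0 rest 1 ++ [1 + rest.length])).map (fun n : Nat => (n : Int))) (i + 1) 0))))
        ∘ (fun k : Nat => (k : Int)))
        = (fun i : Nat =>
          mostCommon1 (((p0 :: rest).drop ((0 :: (posns p0 rest 1 ++ [1 + rest.length])).getD i 0)).take
            ((0 :: (posns p0 rest 1 ++ [1 + rest.length])).getD (i + 1) 0
              - (0 :: (posns p0 rest 1 ++ [1 + rest.length])).getD i 0))) := by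
      funext i
      have hcast1 : ((i : Int) + 1) = ((i + 1 : Nat) : Int) := by push_cast; ring
      have hg : ∀ (j : Nat), PySem.List.pyGetD
          ((0 :: (posns p0 rest 1 ++ [1 + rest.length])).map (fun n : Nat => (n : Int))) (j : Int) 0
          = (((0 :: (posns p0 rest 1 ++ [1 + rest.length])).getD j 0 : Nat) : Int) := by
        intro j
        rw [PySem.List.pyGetD_natCast]
        exact List.getD_map _ 0 _
      simp only [Function.comp_apply, hcast1, hg]
      rw [PySem.List.slice_natCast]
    rw [hfun]
    rw [map_range_pairs (fun a b => mostCommon1 (((p0 :: rest).drop a).take (b - a)))]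
    have hgo := slices_eq_go rest p0 [p0]
    simp only [List.length_cons, List.length_nil, List.cons_append, List.nil_append,
      Nat.zero_add] at hgo
    have hmap : ((0 :: (posns p0 rest 1 ++ [1 + rest.length])).zip
          (0 :: (posns p0 rest 1 ++ [1 + rest.length])).tail).map
        (fun pr : Nat × Nat => mostCommon1 (((p0 :: rest).drop pr.1).take (pr.2 - pr.1)))
        = ((0 :: (posns p0 rest 1 ++ [1 + rest.length])).zip
          (posns p0 rest 1 ++ [1 + rest.length])).map
        (mostCommon1 ∘ (fun pr : Nat × Nat => ((p0 :: rest).drop pr.1).take (pr.2 - pr.1))) := rfl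
    rw [hmap, ← List.map_map (f := fun pr : Nat × Nat => ((p0 :: rest).drop pr.1).take (pr.2 - pr.1))]
    rw [hgo]
    refine congrArg some ?_
    refine List.map_congr_left (fun seg hs => ?_)
    have hne := go_ne_nil rest p0 [p0] (by simp) seg hs
    cases seg with
    | nil => exact absurd rfl hne
    | cons sh st => exact (segBest_eq sh st).symm
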